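-- pv_equiv track=rewrite | github.com/enam-0042/python-test | dependencies/decrypt_token.py | _get_encrypted_dynamic_text
-- ===== SOURCE A (Python) =====
-- def _get_encrypted_dynamic_text(key: str) -> str:
--     """
--     Filters the input key string to remove 'garbage' characters
--     based on a complex, oscillating interval pattern.
--     """
--     should_increase_garbage = True
--     lowest_garbage_no = 4
--     highest_garbage_no = 10
--     no_of_garbage = highest_garbage_no
--     final_key = ""
--     ignore_index = 0
--
--     for single_character in key:
--         if ignore_index < no_of_garbage:
--             ignore_index += 1
--             continue
--
--         final_key += single_character
--         ignore_index = 0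
--
--         if should_increase_garbage:
--             no_of_garbage += 1
--         else:
--             no_of_garbage -= 1
--
--         if no_of_garbage == highest_garbage_no:
--             should_increase_garbage = False
--         elif no_of_garbage == lowest_garbage_no:
--             should_increase_garbage = True
--
--     return final_key
-- ===== SOURCE B (Python) =====
-- def _get_encrypted_dynamic_text(key: str) -> str:
--     # The skip count starts at the upper bound (10) and only ever grows,
--     # so the k-th kept character sits at the closed-form position
--     # p(k) = 10 + 11*k + k*(k+1)//2.  Index those positions directly.
--     n = len(key)
--     chars = []
--     for k in range(n):
--         p = 10 + 11 * k + k * (k + 1) // 2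
--         if p >= n:
--             break
--         chars.append(key[p])
--     return "".join(chars)
-- ===== Notes on version B (the rewrite author's own statement) =====
-- stated objective: faster
-- what changed: A scans every character with a skip-counter state machine; B observes that the skip count starts at its upper bound and only ever grows, so the kept characters sit at the closed-form positions p(k)=10+11k+k(k+1)//2, which B indexes directly, touching only O(sqrt(n)) characters.
import Mathlib
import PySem

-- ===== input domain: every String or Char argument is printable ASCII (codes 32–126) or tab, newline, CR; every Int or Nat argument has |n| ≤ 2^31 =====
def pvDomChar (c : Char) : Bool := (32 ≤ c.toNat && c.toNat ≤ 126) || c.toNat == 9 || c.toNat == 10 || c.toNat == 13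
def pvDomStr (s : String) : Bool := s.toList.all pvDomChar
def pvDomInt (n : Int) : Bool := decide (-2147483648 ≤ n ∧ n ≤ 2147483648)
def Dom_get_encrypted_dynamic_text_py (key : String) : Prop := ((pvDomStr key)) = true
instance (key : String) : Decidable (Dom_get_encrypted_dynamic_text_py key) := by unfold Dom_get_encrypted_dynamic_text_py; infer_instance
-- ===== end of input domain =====

-- B replaces A's per-character skip/keep scan by directly indexing the closed-form kept
-- positions p(k) = 10 + 11k + k(k+1)//2 (the skip count starts at its upper bound and only
-- ever grows, so A's oscillation logic is dead); objective: faster (fewer index operations).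

-- ===== PORT A =====
-- state: (should_increase_garbage, no_of_garbage, ignore_index, final_key)
def pvAStep (st : Bool × Int × Int × List Char) (c : Char) : Bool × Int × Int × List Char :=
  let (inc, g, ig, acc) := st
  if ig < g then (inc, g, ig + 1, acc)
  else
    let acc := acc ++ [c]
    let ig : Int := 0
    let g := if inc then g + 1 else g - 1
    let inc := if g = 10 then false else if g = 4 then true else inc
    (inc, g, ig, acc)

def get_encrypted_dynamic_text_py (key : String) : String :=
  String.mk (key.toList.foldl pvAStep (true, 10, 0, [])).2.2.2

-- ===== PORT B =====
-- the for-loop over range(n) with break, as a recursion over the remaining range list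
def pvAltGo (cs : List Char) (n : Int) : List Int → List Char
  | [] => []
  | k :: ks =>
    let p := 10 + 11 * k + PySem.Int.floordiv (k * (k + 1)) 2
    if n ≤ p then []
    else
      match PySem.List.pyGet? cs p with
      | some c => c :: pvAltGo cs n ks
      | none => []   -- unreachable: 0 ≤ p < n = len cs

def get_encrypted_dynamic_text_py_alt (key : String) : String :=
  let cs := key.toList
  String.mk (pvAltGo cs cs.length (PySem.List.pyRange 0 cs.length 1))

-- ===== PRECONDITION & SPEC =====
def Spec_get_encrypted_dynamic_text_py (key : String) (out : String) : Prop := out = get_encrypted_dynamic_text_py_alt key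
instance (key : String) (out : String) : Decidable (Spec_get_encrypted_dynamic_text_py key out) := by unfold Spec_get_encrypted_dynamic_text_py; infer_instance

-- ===== CLAIM (what is proved, stated in full; the proofs are below) =====
def Claim_equal_get_encrypted_dynamic_text_py : Prop := ∀ (key : String), Dom_get_encrypted_dynamic_text_py key → Spec_get_encrypted_dynamic_text_py key (get_encrypted_dynamic_text_py key)

-- ===== LEMMAS AND PROOFS =====

-- common characterisation: skip s chars, keep one, then skip g+1 with the new g := g+1
def pvGather : List Char → Nat → Nat → List Char
  | [], _, _ => []
  | c :: cs, 0, g => c :: pvGather cs (g + 1) (g + 1)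
  | _ :: cs, s + 1, g => pvGather cs s g

def pvPos (k : Nat) : Nat := 10 + 11 * k + k * (k + 1) / 2

lemma pvGather_drop : ∀ (cs : List Char) (s g : Nat), pvGather cs s g = pvGather (cs.drop s) 0 g := by
  intro cs
  induction cs with
  | nil => intro s g; cases s <;> simp [pvGather]
  | cons c cs ih =>
    intro s g
    cases s with
    | zero => simp
    | succ s => simpa [pvGather] using ih s g

lemma pvA_fold : ∀ (cs : List Char) (g ig : Nat) (acc : List Char), ig ≤ g → 10 ≤ g →
    (cs.foldl pvAStep (true, (g : Int), (ig : Int), acc)).2.2.2 = acc ++ pvGather cs (g - ig) g := by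
  intro cs
  induction cs with
  | nil => intro g ig acc _ _; simp [pvGather]
  | cons c cs ih =>
    intro g ig acc hle h10
    rcases lt_or_eq_of_le hle with hlt | heq
    · have hcond : (ig : Int) < (g : Int) := by exact_mod_cast hlt
      have : (ig : Int) + 1 = ((ig + 1 : Nat) : Int) := by push_cast; ring
      rw [List.foldl_cons, pvAStep, if_pos hcond, this, ih g (ig + 1) acc (by omega) h10]
      obtain ⟨s, hs⟩ : ∃ s, g - ig = s + 1 := ⟨g - ig - 1, by omega⟩
      have hs' : g - (ig + 1) = s := by omega
      obtain ⟨d, hd⟩ : ∃ d, g = ig + 1 + d := ⟨g - ig - 1, by omega⟩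
      rw [hs, hs', pvGather]
    · have hcond : ¬ (ig : Int) < (g : Int) := by exact_mod_cast (by omega : ¬ ig < g)
      have h1 : ((g : Int) + 1) = ((g + 1 : Nat) : Int) := by push_cast; ring
      have hne10 : ¬ ((g : Int) + 1 = 10) := by omega
      have hne4 : ¬ ((g : Int) + 1 = 4) := by omega
      rw [List.foldl_cons, pvAStep]
      simp only [if_neg hcond, if_true, h1]
      rw [if_neg (show ¬ ((g + 1 : Nat) : Int) = 10 by exact_mod_cast (by omega : ¬ g + 1 = 10)),
        if_neg (show ¬ ((g + 1 : Nat) : Int) = 4 by exact_mod_cast (by omega : ¬ g + 1 = 4)),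
        show ((0 : Int)) = ((0 : Nat) : Int) by simp,
        ih (g + 1) 0 (acc ++ [c]) (by omega) (by omega)]
      simp [heq, pvGather]

lemma pvPos_ge (k : Nat) : k + 10 ≤ pvPos k := by unfold pvPos; omega

lemma pvPos_succ (k : Nat) : pvPos (k + 1) = pvPos k + 1 + (10 + k + 1) := by
  unfold pvPos
  have h : (k + 1) * (k + 2) = k * (k + 1) + 2 * (k + 1) := by ring
  have h2 : (k + 1) * (k + 1 + 1) / 2 = k * (k + 1) / 2 + (k + 1) := by
    rw [show k + 1 + 1 = k + 2 from rfl, h, Nat.add_mul_div_left _ _ (by norm_num : 0 < 2)]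
  omega

lemma pvB_go (cs : List Char) : ∀ (m k : Nat), cs.length ≤ k + m →
    pvAltGo cs cs.length (PySem.List.pyRange k cs.length 1) = pvGather (cs.drop (pvPos k)) 0 (10 + k) := by
  intro m
  induction m with
  | zero =>
    intro k hk
    have hd : List.drop (pvPos k) cs = [] :=
      List.drop_eq_nil_of_le (by have := pvPos_ge k; omega)
    simp [PySem.List.pyRange_one_eq_nil (show ((cs.length : Int)) ≤ (k : Int) by exact_mod_cast hk),
      hd, pvAltGo, pvGather]
  | succ m ih =>
    intro k hk
    by_cases hkn : cs.length ≤ k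
    · have hd : List.drop (pvPos k) cs = [] :=
        List.drop_eq_nil_of_le (by have := pvPos_ge k; omega)
      rw [PySem.List.pyRange_one_eq_nil (by exact_mod_cast hkn), hd]
      rfl
    · push_neg at hkn
      rw [PySem.List.pyRange_one_cons (by exact_mod_cast hkn), pvAltGo]
      have hp : (10 + 11 * (k : Int) + PySem.Int.floordiv ((k : Int) * ((k : Int) + 1)) 2) = ((pvPos k : Nat) : Int) := by
        have : ((k : Int) * ((k : Int) + 1)) = ((k * (k + 1) : Nat) : Int) := by push_cast; ring
        rw [this, show (2 : Int) = ((2 : Nat) : Int) from rfl, PySem.Int.floordiv_natCast]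
        unfold pvPos; push_cast; ring
      simp only [hp]
      by_cases hbig : cs.length ≤ pvPos k
      · rw [if_pos (by exact_mod_cast hbig), List.drop_eq_nil_of_le hbig]
        rfl
      · push_neg at hbig
        rw [if_neg (by exact_mod_cast (by omega : ¬ cs.length ≤ pvPos k)),
          PySem.List.pyGet?_natCast, List.getElem?_eq_getElem hbig]
        have hih := ih (k + 1) (by omega)
        push_cast at hih
        rw [hih, List.drop_eq_getElem_cons hbig, pvGather,
          pvGather_drop (List.drop (pvPos k + 1) cs) (10 + k + 1) (10 + k + 1), List.drop_drop]
        have h3 : pvPos (k + 1) = 10 + k + 1 + (pvPos k + 1) := by rw [pvPos_succ k]; omega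
        rw [h3, Nat.add_comm (10 + k + 1) (pvPos k + 1)]
        rfl

-- ===== VERDICT (by name: the statement is the Claim_ definition above) =====
theorem get_encrypted_dynamic_text_py_spec : Claim_equal_get_encrypted_dynamic_text_py := by
  intro key _
  unfold Spec_get_encrypted_dynamic_text_py get_encrypted_dynamic_text_py get_encrypted_dynamic_text_py_alt
  have hA := pvA_fold key.toList 10 0 [] (by omega) (by omega)
  have hB := pvB_go key.toList key.toList.length 0 (by omega)
  push_cast at hA hB
  simp only [hA, hB]
  rw [show pvPos 0 = 10 by norm_num [pvPos], ← pvGather_drop]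
  simp
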